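-- pv_equiv track=rewrite | github.com/msunkang70-coder/60s-economic-signal | core/ecos.py | _dedup_by_time
-- ===== SOURCE A (Python) =====
-- def _dedup_by_time(rows: list) -> list:
--     """
--     같은 TIME에 여러 행이 있을 때 ITEM_CODE2 기준 마지막 행을 유지한다.
--     731Y004 등 기간말(0000100)·기간평균(0000200)을 모두 반환하는 지표에 사용.
--     TIME·ITEM_CODE2 오름차순 정렬 → 같은 TIME의 마지막 항목(기간평균=0000200) 보존.
--     """
--     sorted_rows = sorted(
--         rows,
--         key=lambda r: (r.get("TIME", ""), r.get("ITEM_CODE2", "")),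
--     )
--     seen: dict = {}
--     for row in sorted_rows:
--         seen[row.get("TIME", "")] = row
--     return sorted(seen.values(), key=lambda r: r.get("TIME", ""))
-- ===== SOURCE B (Python) =====
-- def _dedup_by_time(rows: list) -> list:
--     # One pass: for each TIME keep the best row (max ITEM_CODE2, later row wins
--     # ties), then emit the winners in ascending TIME order.
--     best: dict = {}
--     for row in rows:
--         t = row.get("TIME", "")
--         cur = best.get(t)
--         if cur is None or row.get("ITEM_CODE2", "") >= cur.get("ITEM_CODE2", ""):
--             best[t] = row
--     return [best[t] for t in sorted(best)]
-- ===== Notes on version B (the rewrite author's own statement) =====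
-- stated objective: alternative
-- what changed: A sorts all n rows by the (TIME, ITEM_CODE2) tuple key and then overwrites a dict in sorted order; B makes one unsorted pass keeping per TIME the row with the largest ITEM_CODE2 (later row wins ties) and only sorts the distinct TIME keys at the end.
import Mathlib
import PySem

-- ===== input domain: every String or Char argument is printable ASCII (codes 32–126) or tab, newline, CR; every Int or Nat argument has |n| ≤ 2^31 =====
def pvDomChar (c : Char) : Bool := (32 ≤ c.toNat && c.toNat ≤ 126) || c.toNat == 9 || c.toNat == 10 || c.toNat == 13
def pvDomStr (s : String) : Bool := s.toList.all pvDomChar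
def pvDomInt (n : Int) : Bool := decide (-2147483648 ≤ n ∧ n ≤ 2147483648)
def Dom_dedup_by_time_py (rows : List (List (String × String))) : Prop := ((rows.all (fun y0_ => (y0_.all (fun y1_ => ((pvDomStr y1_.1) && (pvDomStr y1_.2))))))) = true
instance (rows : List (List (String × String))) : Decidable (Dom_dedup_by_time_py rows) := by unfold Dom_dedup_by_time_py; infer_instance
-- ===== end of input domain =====

-- B replaces A's sort-then-overwrite by a single max-keeping pass plus a sort of the distinct TIME keys (a different algorithm of similar cost); the return value is proved equal.

-- ===== PORT A =====
-- row.get(k, "") : a row is a dict[str,str] (association list, first-match lookup)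
def pvGet (r : List (String × String)) (k : String) : String :=
  (PySem.Dict.mk r).getD k ""

def dedup_by_time_py (rows : List (List (String × String))) : List (List (String × String)) :=
  let sorted_rows := PySem.List.sorted2 rows (fun r => pvGet r "TIME") (fun r => pvGet r "ITEM_CODE2")
  let seen : PySem.Dict String (List (String × String)) :=
    sorted_rows.foldl (fun d row => d.insert (pvGet row "TIME") row) PySem.Dict.empty
  PySem.List.sorted seen.values (fun r => pvGet r "TIME")

-- ===== PORT B =====
def dedup_by_time_py_alt (rows : List (List (String × String))) : List (List (String × String)) :=
  let best : PySem.Dict String (List (String × String)) :=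
    rows.foldl (fun d row =>
      match d.get? (pvGet row "TIME") with
      | none => d.insert (pvGet row "TIME") row
      | some cur =>
          if pvGet cur "ITEM_CODE2" ≤ pvGet row "ITEM_CODE2" then
            d.insert (pvGet row "TIME") row
          else d)
      PySem.Dict.empty
  -- [best[t] for t in sorted(best)]  (t is always a key of best, so best[t] cannot raise; getD's default is never read)
  (PySem.List.sorted best.keys (fun t => t)).map (fun t => best.getD t [])

-- ===== PRECONDITION & SPEC =====
def Spec_dedup_by_time_py (rows : List (List (String × String))) (out : List (List (String × String))) : Prop := out = dedup_by_time_py_alt rows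
instance (rows : List (List (String × String))) (out : List (List (String × String))) : Decidable (Spec_dedup_by_time_py rows out) := by unfold Spec_dedup_by_time_py; infer_instance

-- ===== CLAIM (what is proved, stated in full; the proofs are below) =====
def Claim_equal_dedup_by_time_py : Prop := ∀ (rows : List (List (String × String))), Dom_dedup_by_time_py rows → Spec_dedup_by_time_py rows (dedup_by_time_py rows)

-- ===== LEMMAS AND PROOFS =====

abbrev PRow : Type := List (String × String)
def rK1 (r : PRow) : String := pvGet r "TIME"
def rK2 (r : PRow) : String := pvGet r "ITEM_CODE2"
def bLex (a b : PRow) : Bool := decide (rK1 a < rK1 b) || (!decide (rK1 b < rK1 a) && decide (rK2 a < rK2 b))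

lemma bLex_iff (a b : PRow) : bLex a b = true ↔ (rK1 a < rK1 b ∨ (rK1 a = rK1 b ∧ rK2 a < rK2 b)) := by
  simp only [bLex, Bool.or_eq_true, Bool.and_eq_true, Bool.not_eq_true', decide_eq_true_eq,
    decide_eq_false_iff_not]
  constructor
  · rintro (h | ⟨h1, h2⟩)
    · exact Or.inl h
    · rcases lt_trichotomy (rK1 a) (rK1 b) with hc | hc | hc
      · exact Or.inl hc
      · exact Or.inr ⟨hc, h2⟩
      · exact absurd hc h1
  · rintro (h | ⟨h1, h2⟩)
    · exact Or.inl h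
    · exact Or.inr ⟨fun hc => absurd (h1 ▸ hc) (lt_irrefl _), h2⟩

lemma bLex_false_iff (a b : PRow) : bLex a b = false ↔ ¬ (rK1 a < rK1 b ∨ (rK1 a = rK1 b ∧ rK2 a < rK2 b)) := by
  rw [← bLex_iff]; cases h : bLex a b <;> simp

lemma bLex_asymm (a b : PRow) : bLex a b = true → bLex b a = false := by
  rw [bLex_iff, bLex_false_iff]
  rintro (h | ⟨h1, h2⟩) (h' | ⟨h1', h2'⟩)
  · exact lt_asymm h h'
  · exact absurd (h1' ▸ h) (lt_irrefl _)
  · exact absurd (h1 ▸ h') (lt_irrefl _)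
  · exact lt_asymm h2 h2'

lemma bLex_trans (a b c : PRow) : bLex a b = true → bLex b c = true → bLex a c = true := by
  rw [bLex_iff, bLex_iff, bLex_iff]
  rintro (h | ⟨h1, h2⟩) (h' | ⟨h1', h2'⟩)
  · exact Or.inl (lt_trans h h')
  · exact Or.inl (h1' ▸ h)
  · exact Or.inl (h1 ▸ h')
  · exact Or.inr ⟨h1.trans h1', lt_trans h2 h2'⟩

lemma bLex_cotrans (x y z : PRow) : bLex x y = true → bLex z y = false → bLex x z = true := by
  rw [bLex_iff, bLex_iff, bLex_false_iff]
  intro hxy hzy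
  rcases not_or.mp hzy with ⟨hz1, hz2⟩
  rcases hxy with h | ⟨h1, h2⟩
  · rcases lt_trichotomy (rK1 x) (rK1 z) with hc | hc | hc
    · exact Or.inl hc
    · exact absurd (hc ▸ h) hz1
    · exact absurd (lt_trans hc h) hz1
  · rcases lt_trichotomy (rK1 x) (rK1 z) with hc | hc | hc
    · exact Or.inl hc
    · refine Or.inr ⟨hc, ?_⟩
      have hzy : rK1 z = rK1 y := by rw [← hc, h1]
      have : ¬ rK2 z < rK2 y := fun hh => hz2 ⟨hzy, hh⟩
      exact lt_of_lt_of_le h2 (le_of_not_gt this)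
    · exact absurd (h1 ▸ hc) hz1
def b2 (a b : PRow) : Bool := decide (rK2 a < rK2 b)

lemma b2_asymm (a b : PRow) : b2 a b = true → b2 b a = false := by
  simp only [b2, decide_eq_true_eq, decide_eq_false_iff_not]; exact lt_asymm

lemma b2_trans (a b c : PRow) : b2 a b = true → b2 b c = true → b2 a c = true := by
  simp only [b2, decide_eq_true_eq]; exact lt_trans

lemma insertBy_cons (before : PRow → PRow → Bool) (x y : PRow) (ys : List PRow) :
    PySem.List.insertBy before x (y :: ys) =
      if before x y then x :: y :: ys else y :: PySem.List.insertBy before x ys := rfl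

lemma insertBy_nil (before : PRow → PRow → Bool) (x : PRow) :
    PySem.List.insertBy before x [] = [x] := rfl

lemma insertBy_ne_nil (before : PRow → PRow → Bool) (x : PRow) (ys : List PRow) :
    PySem.List.insertBy before x ys ≠ [] := by
  cases ys with
  | nil => simp [insertBy_nil]
  | cons y ys => rw [insertBy_cons]; split <;> simp

lemma pairwise_insertBy (before : PRow → PRow → Bool)
    (hasymm : ∀ a b, before a b = true → before b a = false)
    (htrans : ∀ a b c, before a b = true → before b c = true → before a c = true)
    (x : PRow) (S : List PRow) (hS : S.Pairwise (fun a b => before b a = false)) :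
    (PySem.List.insertBy before x S).Pairwise (fun a b => before b a = false) := by
  induction S with
  | nil => simp [insertBy_nil]
  | cons y ys ih =>
    rw [insertBy_cons]
    rcases List.pairwise_cons.mp hS with ⟨hy, hys⟩
    by_cases h : before x y = true
    · rw [if_pos h]
      refine List.pairwise_cons.mpr ⟨?_, hS⟩
      intro z hz
      rcases List.mem_cons.mp hz with h1 | hz
      · rw [h1]; exact hasymm x y h
      · cases hb : before z x with
        | false => rfl
        | true =>
          have : before z y = true := htrans z x y hb h
          rw [hy z hz] at this; exact absurd this Bool.false_ne_true
    · have h' : before x y = false := by cases hb : before x y; rfl; exact absurd hb h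
      rw [if_neg h]
      refine List.pairwise_cons.mpr ⟨?_, ih hys⟩
      intro z hz
      rcases (PySem.List.mem_insertBy before x z ys).mp hz with rfl | hz
      · exact h'
      · exact hy z hz
lemma filter_insertBy (p : PRow → Bool) (x : PRow) (S : List PRow)
    (hS : S.Pairwise (fun a b => bLex b a = false)) :
    (PySem.List.insertBy bLex x S).filter p =
      if p x then PySem.List.insertBy bLex x (S.filter p) else S.filter p := by
  induction S with
  | nil => cases hp : p x <;> simp [insertBy_nil, hp]
  | cons y ys ih =>
    rcases List.pairwise_cons.mp hS with ⟨hy, hys⟩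
    rw [insertBy_cons]
    by_cases hb : bLex x y = true
    · rw [if_pos hb]
      cases hp : p x
      · simp [List.filter_cons, hp]
      · cases hpy : p y
        · have hfront : ∀ z ∈ ys.filter p, bLex x z = true := by
            intro z hz
            exact bLex_cotrans x y z hb (hy z (List.mem_of_mem_filter hz))
          have hstep : PySem.List.insertBy bLex x ((y :: ys).filter p) = x :: ys.filter p := by
            rw [List.filter_cons_of_neg (by simp [hpy])]
            cases hfy : ys.filter p with
            | nil => simp [insertBy_nil]
            | cons z zs =>
              rw [insertBy_cons, if_pos (hfront z (hfy ▸ List.mem_cons_self ..))]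
          rw [hstep]
          simp [hp, hpy]
        · rw [if_pos rfl, List.filter_cons_of_pos hpy, insertBy_cons, if_pos hb,
            List.filter_cons_of_pos hp, List.filter_cons_of_pos hpy]
    · have hb' : bLex x y = false := by cases h : bLex x y; rfl; exact absurd h hb
      rw [if_neg hb]
      cases hpy : p y
      · rw [List.filter_cons_of_neg (by simp [hpy]), List.filter_cons_of_neg (by simp [hpy]),
          ih hys]
      · rw [List.filter_cons_of_pos (by simp [hpy]), List.filter_cons_of_pos (by simp [hpy]),
          ih hys]
        cases hp : p x
        · simp
        · rw [if_pos rfl, if_pos rfl, insertBy_cons, if_neg (by simp [hb'])]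

lemma filter_foldl_insertBy (p : PRow → Bool) (L acc : List PRow)
    (hacc : acc.Pairwise (fun a b => bLex b a = false)) :
    (L.foldl (fun s x => PySem.List.insertBy bLex x s) acc).filter p =
      (L.filter p).foldl (fun s x => PySem.List.insertBy bLex x s) (acc.filter p) := by
  induction L generalizing acc with
  | nil => rfl
  | cons x L ih =>
    have hacc' := pairwise_insertBy bLex bLex_asymm bLex_trans x acc hacc
    rw [List.foldl_cons, ih _ hacc', filter_insertBy p x acc hacc]
    cases hp : p x
    · rw [List.filter_cons_of_neg (by simp [hp]), if_neg (by simp)]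
    · rw [List.filter_cons_of_pos (by simp [hp]), if_pos rfl, List.foldl_cons]

lemma bLex_eq_b2 (x y : PRow) (h : rK1 x = rK1 y) : bLex x y = b2 x y := by
  simp [bLex, b2, h]

lemma insertBy_congr_b2 (x : PRow) (S : List PRow) (t : String)
    (hx : rK1 x = t) (hS : ∀ y ∈ S, rK1 y = t) :
    PySem.List.insertBy bLex x S = PySem.List.insertBy b2 x S := by
  induction S with
  | nil => rfl
  | cons y ys ih =>
    rw [insertBy_cons, insertBy_cons,
      bLex_eq_b2 x y (by rw [hx, hS y (List.mem_cons_self ..)]),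
      ih (fun z hz => hS z (List.mem_cons_of_mem _ hz))]

lemma foldl_insertBy_congr_b2 (M : List PRow) (t : String) (hM : ∀ r ∈ M, rK1 r = t) :
    ∀ acc : List PRow, (∀ r ∈ acc, rK1 r = t) →
    M.foldl (fun s x => PySem.List.insertBy bLex x s) acc =
      M.foldl (fun s x => PySem.List.insertBy b2 x s) acc := by
  induction M with
  | nil => intro acc _; rfl
  | cons x M ih =>
    intro acc hacc
    have hx : rK1 x = t := hM x (List.mem_cons_self ..)
    rw [List.foldl_cons, List.foldl_cons, insertBy_congr_b2 x acc t hx hacc]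
    refine ih (fun r hr => hM r (List.mem_cons_of_mem _ hr)) _ ?_
    intro r hr
    rcases (PySem.List.mem_insertBy b2 x r acc).mp hr with h1 | hr
    · rw [h1]; exact hx
    · exact hacc r hr
def gStep (o : Option PRow) (r : PRow) : Option PRow :=
  some (match o with | none => r | some c => if rK2 c ≤ rK2 r then r else c)

lemma getLast?_insertBy_b2 (x : PRow) (S : List PRow)
    (hS : S.Pairwise (fun a b => b2 b a = false)) :
    (PySem.List.insertBy b2 x S).getLast? = gStep S.getLast? x := by
  induction S with
  | nil => simp [insertBy_nil, gStep]
  | cons y ys ih =>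
    rcases List.pairwise_cons.mp hS with ⟨hy, hys⟩
    rw [insertBy_cons]
    by_cases hb : b2 x y = true
    · rw [if_pos hb]
      -- x strictly below y ≤ last: the last element stays and wins the gStep comparison
      have hlast : ∀ l, (y :: ys).getLast? = some l → ¬ rK2 l ≤ rK2 x := by
        intro l hl hle
        have hmem : l ∈ y :: ys := List.mem_of_getLast? hl
        have hyl : rK2 y ≤ rK2 l := by
          rcases List.mem_cons.mp hmem with h1 | h1
          · rw [h1]
          · have := hy l h1
            simp only [b2, decide_eq_false_iff_not] at this
            exact le_of_not_gt this
        have hxy : rK2 x < rK2 y := by simpa [b2] using hb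
        exact absurd (lt_of_lt_of_le hxy (le_trans hyl hle)) (by simp)
      obtain ⟨l, hl⟩ : ∃ l, (y :: ys).getLast? = some l := by
        cases hys' : (y :: ys).getLast? with
        | none => simp at hys'
        | some l => exact ⟨l, rfl⟩
      rw [List.getLast?_cons_cons, hl]
      simp [gStep, hlast l hl]
    · rw [if_neg hb]
      cases ys with
      | nil =>
        have hyx : rK2 y ≤ rK2 x := by
          have : ¬ rK2 x < rK2 y := by simpa [b2] using hb
          exact le_of_not_gt this
        simp [insertBy_nil, gStep, hyx]
      | cons z zs =>
        cases hI : PySem.List.insertBy b2 x (z :: zs) with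
        | nil => exact absurd hI (insertBy_ne_nil b2 x (z :: zs))
        | cons w ws =>
          rw [List.getLast?_cons_cons, List.getLast?_cons_cons, ← hI, ih hys]
lemma getLast?_foldl_insertBy_b2 (L : List PRow) :
    ∀ acc : List PRow, acc.Pairwise (fun a b => b2 b a = false) →
    (L.foldl (fun s x => PySem.List.insertBy b2 x s) acc).getLast? = L.foldl gStep acc.getLast? := by
  induction L with
  | nil => intro acc _; rfl
  | cons x L ih =>
    intro acc hacc
    rw [List.foldl_cons, List.foldl_cons,
      ih _ (pairwise_insertBy b2 b2_asymm b2_trans x acc hacc),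
      getLast?_insertBy_b2 x acc hacc]

lemma foldl_replace_eq_getLast? (M : List PRow) (o : Option PRow) :
    M.foldl (fun _ r => some r) o = match M.getLast? with | none => o | some l => some l := by
  induction M generalizing o with
  | nil => rfl
  | cons r M ih =>
    rw [List.foldl_cons, ih]
    cases M with
    | nil => rfl
    | cons s M =>
      rw [List.getLast?_cons_cons]
      cases hM : (s :: M).getLast? with
      | none => simp at hM
      | some l => rfl

def stepA (d : PySem.Dict String PRow) (row : PRow) : PySem.Dict String PRow := d.insert (rK1 row) row
def stepB (d : PySem.Dict String PRow) (row : PRow) : PySem.Dict String PRow :=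
  match d.get? (rK1 row) with
  | none => d.insert (rK1 row) row
  | some cur => if rK2 cur ≤ rK2 row then d.insert (rK1 row) row else d

lemma get?_stepB_eq (d : PySem.Dict String PRow) (row : PRow) (t : String) (h : rK1 row = t) :
    (stepB d row).get? t = gStep (d.get? t) row := by
  unfold stepB
  rw [h]
  cases hc : d.get? t with
  | none => simp [gStep, PySem.Dict.get?_insert_self]
  | some cur =>
    by_cases hle : rK2 cur ≤ rK2 row
    · simp [gStep, hle, PySem.Dict.get?_insert_self]
    · simp [gStep, hle, hc]

lemma get?_stepB_ne (d : PySem.Dict String PRow) (row : PRow) (t : String) (h : rK1 row ≠ t) :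
    (stepB d row).get? t = d.get? t := by
  unfold stepB
  cases hc : d.get? (rK1 row) with
  | none => rw [PySem.Dict.get?_insert_of_ne _ _ (fun hcc => h hcc.symm)]
  | some cur =>
    by_cases hle : rK2 cur ≤ rK2 row
    · simp only [hle, if_true]
      rw [PySem.Dict.get?_insert_of_ne _ _ (fun hcc => h hcc.symm)]
    · simp [hle]

lemma get?_foldl_stepA (sr : List PRow) (t : String) :
    ∀ d : PySem.Dict String PRow,
    (sr.foldl stepA d).get? t = (sr.filter (fun r => rK1 r == t)).foldl (fun _ r => some r) (d.get? t) := by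
  induction sr with
  | nil => intro d; rfl
  | cons row sr ih =>
    intro d
    rw [List.foldl_cons, ih]
    by_cases h : rK1 row = t
    · rw [List.filter_cons_of_pos (by simp [h]), List.foldl_cons]
      show (sr.filter _).foldl _ ((stepA d row).get? t) = _
      rw [stepA, h, PySem.Dict.get?_insert_self]
    · rw [List.filter_cons_of_neg (by simp [h]), stepA,
        PySem.Dict.get?_insert_of_ne _ _ (fun hc => h hc.symm)]

lemma get?_foldl_stepB (rs : List PRow) (t : String) :
    ∀ d : PySem.Dict String PRow,
    (rs.foldl stepB d).get? t = (rs.filter (fun r => rK1 r == t)).foldl gStep (d.get? t) := by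
  induction rs with
  | nil => intro d; rfl
  | cons row rs ih =>
    intro d
    rw [List.foldl_cons, ih]
    by_cases h : rK1 row = t
    · rw [List.filter_cons_of_pos (by simp [h]), List.foldl_cons, get?_stepB_eq d row t h]
    · rw [List.filter_cons_of_neg (by simp [h]), get?_stepB_ne d row t h]
lemma keys_insert (d : PySem.Dict String PRow) (k : String) (v : PRow) :
    (d.insert k v).keys = if d.contains k then d.keys else d.keys ++ [k] := by
  by_cases h : d.contains k = true
  · rw [if_pos h]
    show ((d.insert k v).items).map Prod.fst = (d.items).map Prod.fst
    rw [PySem.Dict.items_insert_of_contains d v h, List.map_map]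
    refine List.map_congr_left ?_
    intro p _
    by_cases hp : (p.1 == k) = true
    · simp [Function.comp, (beq_iff_eq ..).mp hp]
    · simp [Function.comp, hp]
  · have h' : d.contains k = false := by cases hc : d.contains k; rfl; exact absurd hc h
    rw [if_neg (by simp [h'])]
    show ((d.insert k v).items).map Prod.fst = _
    rw [PySem.Dict.items_insert_of_not_contains d v h', List.map_append]
    rfl

lemma keys_insert_mem (d : PySem.Dict String PRow) (k : String) (v : PRow) (x : String) :
    x ∈ (d.insert k v).keys ↔ x ∈ d.keys ∨ x = k := by
  rw [keys_insert]
  by_cases h : d.contains k = true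
  · rw [if_pos h]
    have hk : k ∈ d.keys := by
      rw [PySem.Dict.contains_eq_decide_mem_keys] at h
      exact of_decide_eq_true h
    constructor
    · exact Or.inl
    · rintro (hx | rfl); exact hx; exact hk
  · rw [if_neg h]; simp

lemma keys_insert_nodup (d : PySem.Dict String PRow) (k : String) (v : PRow)
    (hd : d.keys.Nodup) : (d.insert k v).keys.Nodup := by
  rw [keys_insert]
  by_cases h : d.contains k = true
  · rw [if_pos h]; exact hd
  · have h' : d.contains k = false := by cases hc : d.contains k; rfl; exact absurd hc h
    rw [if_neg (by simp [h'])]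
    have hk : k ∉ d.keys := by
      rw [PySem.Dict.contains_eq_decide_mem_keys] at h'
      exact of_decide_eq_false h'
    rw [List.nodup_append]
    refine ⟨hd, by simp, ?_⟩
    intro a ha b hb hab
    rw [List.mem_singleton] at hb
    exact hk (hb ▸ hab ▸ ha)

lemma stepB_eq_or (d : PySem.Dict String PRow) (row : PRow) :
    stepB d row = d.insert (rK1 row) row ∨ (stepB d row = d ∧ rK1 row ∈ d.keys) := by
  cases hc : d.get? (rK1 row) with
  | none => simp only [stepB, hc]; exact Or.inl trivial
  | some cur =>
    by_cases hle : rK2 cur ≤ rK2 row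
    · simp only [stepB, hc, if_pos hle]; exact Or.inl trivial
    · simp only [stepB, hc, if_neg hle]
      refine Or.inr ⟨trivial, ?_⟩
      by_contra hk
      rw [← PySem.Dict.get?_eq_none_iff_not_mem_keys] at hk
      rw [hk] at hc
      simp at hc

lemma keys_foldl_stepA (sr : List PRow) :
    ∀ d : PySem.Dict String PRow, d.keys.Nodup →
      ((sr.foldl stepA d).keys.Nodup ∧
        ∀ x, x ∈ (sr.foldl stepA d).keys ↔ x ∈ d.keys ∨ x ∈ sr.map rK1) := by
  induction sr with
  | nil => intro d hd; exact ⟨hd, fun x => by simp⟩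
  | cons row sr ih =>
    intro d hd
    rw [List.foldl_cons]
    obtain ⟨h1, h2⟩ := ih (stepA d row) (keys_insert_nodup d (rK1 row) row hd)
    refine ⟨h1, fun x => ?_⟩
    rw [h2 x, stepA, keys_insert_mem]
    simp only [List.map_cons, List.mem_cons]
    tauto

lemma keys_foldl_stepB (rs : List PRow) :
    ∀ d : PySem.Dict String PRow, d.keys.Nodup →
      ((rs.foldl stepB d).keys.Nodup ∧
        ∀ x, x ∈ (rs.foldl stepB d).keys ↔ x ∈ d.keys ∨ x ∈ rs.map rK1) := by
  induction rs with
  | nil => intro d hd; exact ⟨hd, fun x => by simp⟩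
  | cons row rs ih =>
    intro d hd
    rw [List.foldl_cons]
    have hnodup : (stepB d row).keys.Nodup := by
      rcases stepB_eq_or d row with h | ⟨h, _⟩
      · rw [h]; exact keys_insert_nodup d (rK1 row) row hd
      · rw [h]; exact hd
    have hmem : ∀ x, x ∈ (stepB d row).keys ↔ x ∈ d.keys ∨ x = rK1 row := by
      intro x
      rcases stepB_eq_or d row with h | ⟨h, hk⟩
      · rw [h]; exact keys_insert_mem d (rK1 row) row x
      · rw [h]
        constructor
        · exact Or.inl
        · rintro (hx | rfl); exact hx; exact hk
    obtain ⟨h1, h2⟩ := ih (stepB d row) hnodup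
    refine ⟨h1, fun x => ?_⟩
    rw [h2 x, hmem x]
    simp only [List.map_cons, List.mem_cons]
    tauto
def cval (rows : List PRow) (t : String) : Option PRow :=
  (rows.filter (fun r => rK1 r == t)).foldl gStep none

lemma foldl_gStep_mem (M : List PRow) :
    ∀ (o : Option PRow) (w : PRow), M.foldl gStep o = some w → (o = some w ∨ w ∈ M) := by
  induction M with
  | nil => intro o w h; exact Or.inl h
  | cons r M ih =>
    intro o w h
    rw [List.foldl_cons] at h
    rcases ih _ w h with h1 | h1
    · cases o with
      | none =>
        simp only [gStep] at h1
        exact Or.inr (by rw [← Option.some.inj h1]; exact List.mem_cons_self ..)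
      | some c =>
        simp only [gStep] at h1
        by_cases hle : rK2 c ≤ rK2 r
        · rw [if_pos hle] at h1
          exact Or.inr (by rw [← Option.some.inj h1]; exact List.mem_cons_self ..)
        · rw [if_neg hle] at h1
          exact Or.inl (by rw [Option.some.inj h1])
    · exact Or.inr (List.mem_cons_of_mem _ h1)

lemma foldl_gStep_some (M : List PRow) :
    ∀ c : PRow, ∃ w, M.foldl gStep (some c) = some w := by
  induction M with
  | nil => intro c; exact ⟨c, rfl⟩
  | cons r M ih =>
    intro c
    rw [List.foldl_cons]
    by_cases hle : rK2 c ≤ rK2 r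
    · simpa [gStep, hle] using ih r
    · simpa [gStep, hle] using ih c

lemma cval_isSome (rows : List PRow) (t : String) (h : t ∈ rows.map rK1) :
    ∃ w, cval rows t = some w ∧ rK1 w = t := by
  obtain ⟨r, hr, hrt⟩ := List.mem_map.mp h
  have hrf : r ∈ rows.filter (fun r => rK1 r == t) :=
    List.mem_filter.mpr ⟨hr, by simp [hrt]⟩
  unfold cval
  cases hM : rows.filter (fun r => rK1 r == t) with
  | nil => rw [hM] at hrf; exact absurd hrf (List.not_mem_nil)
  | cons r0 M =>
    rw [List.foldl_cons]
    have : gStep none r0 = some r0 := rfl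
    rw [this]
    obtain ⟨w, hw⟩ := foldl_gStep_some M r0
    refine ⟨w, hw, ?_⟩
    have hwmem : w ∈ rows.filter (fun r => rK1 r == t) := by
      rw [hM]
      rcases foldl_gStep_mem M (some r0) w hw with h1 | h1
      · rw [← Option.some.inj h1]; exact List.mem_cons_self ..
      · exact List.mem_cons_of_mem _ h1
    have := List.of_mem_filter hwmem
    exact (beq_iff_eq ..).mp this

lemma seen_get? (rows : List PRow) (t : String) :
    (((PySem.List.sorted2 rows rK1 rK2).foldl stepA PySem.Dict.empty).get? t) = cval rows t := by
  have hsr : PySem.List.sorted2 rows rK1 rK2 =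
      rows.foldl (fun acc x => PySem.List.insertBy bLex x acc) [] := rfl
  rw [get?_foldl_stepA, PySem.Dict.get?_empty, foldl_replace_eq_getLast?, hsr,
    filter_foldl_insertBy _ rows [] (List.Pairwise.nil)]
  have hmem : ∀ r ∈ rows.filter (fun r => rK1 r == t), rK1 r = t := by
    intro r hr
    exact (beq_iff_eq ..).mp ((List.mem_filter.mp hr).2)
  rw [show (List.filter (fun r => rK1 r == t) []) = ([] : List PRow) from rfl,
    foldl_insertBy_congr_b2 _ t hmem [] (by intro r hr; exact absurd hr (List.not_mem_nil)),
    getLast?_foldl_insertBy_b2 _ [] List.Pairwise.nil]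
  show (match (rows.filter (fun r => rK1 r == t)).foldl gStep none with
        | none => none | some l => some l) = cval rows t
  unfold cval
  cases hc : (rows.filter (fun r => rK1 r == t)).foldl gStep none with
  | none => rfl
  | some l => rfl

lemma best_get? (rows : List PRow) (t : String) :
    ((rows.foldl stepB PySem.Dict.empty).get? t) = cval rows t := by
  rw [get?_foldl_stepB, PySem.Dict.get?_empty]
  rfl
def timesSorted (rows : List PRow) : List String :=
  PySem.List.sorted (PySem.List.dedup (rows.map rK1)) (fun u => u)

def fWin (rows : List PRow) (u : String) : PRow := (cval rows u).getD []

lemma timesSorted_pairwise (rows : List PRow) :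
    (timesSorted rows).Pairwise (· < ·) := by
  unfold timesSorted
  rw [PySem.List.dedup_eq_ofList]
  exact PySem.List.sorted_ofList_pairwise_lt _

lemma timesSorted_mem (rows : List PRow) (x : String) :
    x ∈ timesSorted rows ↔ x ∈ rows.map rK1 := by
  unfold timesSorted
  rw [PySem.List.mem_sorted, PySem.List.mem_dedup]

lemma timesSorted_nodup (rows : List PRow) : (timesSorted rows).Nodup :=
  (PySem.List.sorted_perm _ _ _).symm.nodup (PySem.List.nodup_dedup _)

lemma fWin_key (rows : List PRow) (u : String) (h : u ∈ rows.map rK1) :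
    rK1 (fWin rows u) = u := by
  obtain ⟨w, hw, hwt⟩ := cval_isSome rows u h
  unfold fWin
  rw [hw]
  exact hwt

lemma empty_keys_nodup : (PySem.Dict.empty : PySem.Dict String PRow).keys.Nodup := by
  rw [PySem.Dict.keys_empty]; exact List.nodup_nil

lemma A_eq (rows : List PRow) :
    dedup_by_time_py rows = (timesSorted rows).map (fWin rows) := by
  show PySem.List.sorted ((PySem.List.sorted2 rows rK1 rK2).foldl stepA PySem.Dict.empty).values rK1
      = (timesSorted rows).map (fWin rows)
  obtain ⟨hnodup, hmem⟩ := keys_foldl_stepA (PySem.List.sorted2 rows rK1 rK2) PySem.Dict.empty empty_keys_nodup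
  have hmem' : ∀ x, x ∈ ((PySem.List.sorted2 rows rK1 rK2).foldl stepA PySem.Dict.empty).keys ↔ x ∈ rows.map rK1 := by
    intro x
    rw [hmem x, PySem.Dict.keys_empty]
    simp only [List.not_mem_nil, false_or]
    exact ((PySem.List.sorted2_perm rows rK1 rK2 false).map rK1).mem_iff
  have hgd : ∀ k, ((PySem.List.sorted2 rows rK1 rK2).foldl stepA PySem.Dict.empty).getD k [] = fWin rows k := by
    intro k
    show ((((PySem.List.sorted2 rows rK1 rK2).foldl stepA PySem.Dict.empty)).get? k).getD [] = _
    rw [seen_get?]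
    rfl
  have hperm : ((timesSorted rows).map (fWin rows)).Perm
      ((PySem.List.sorted2 rows rK1 rK2).foldl stepA PySem.Dict.empty).values := by
    rw [PySem.Dict.values_eq_map_keys _ hnodup [],
      List.map_congr_left (fun k _ => hgd k)]
    refine List.Perm.map _ ?_
    exact (List.perm_ext_iff_of_nodup (timesSorted_nodup rows) hnodup).mpr
      (fun x => by rw [timesSorted_mem, hmem' x])
  have hpair : ((timesSorted rows).map (fWin rows)).Pairwise (fun a b => rK1 a < rK1 b) := by
    rw [List.pairwise_map]
    refine (timesSorted_pairwise rows).imp_of_mem ?_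
    intro a b ha hb hab
    rw [fWin_key rows a ((timesSorted_mem rows a).mp ha),
      fWin_key rows b ((timesSorted_mem rows b).mp hb)]
    exact hab
  exact PySem.List.sorted_eq_of_perm_of_pairwise_lt _ _ _ hperm hpair

lemma B_eq (rows : List PRow) :
    dedup_by_time_py_alt rows = (timesSorted rows).map (fWin rows) := by
  show (PySem.List.sorted (rows.foldl stepB PySem.Dict.empty).keys (fun u => u)).map
      (fun u => (rows.foldl stepB PySem.Dict.empty).getD u []) = _
  obtain ⟨hnodup, hmem⟩ := keys_foldl_stepB rows PySem.Dict.empty empty_keys_nodup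
  have hperm : (rows.foldl stepB PySem.Dict.empty).keys.Perm (PySem.List.dedup (rows.map rK1)) := by
    refine (List.perm_ext_iff_of_nodup hnodup (PySem.List.nodup_dedup _)).mpr ?_
    intro x
    rw [PySem.List.mem_dedup, hmem x, PySem.Dict.keys_empty]
    simp
  have hkeys : PySem.List.sorted (rows.foldl stepB PySem.Dict.empty).keys (fun u => u) = timesSorted rows :=
    PySem.List.sorted_eq_sorted_of_perm _ _ _ (fun a b h => h) hperm
  rw [hkeys]
  refine List.map_congr_left ?_
  intro u _
  show (((rows.foldl stepB PySem.Dict.empty)).get? u).getD [] = _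
  rw [best_get?]
  rfl

lemma final_eq (rows : List PRow) : dedup_by_time_py rows = dedup_by_time_py_alt rows := by
  rw [A_eq, B_eq]

-- ===== VERDICT (by name: the statement is the Claim_ definition above) =====
theorem dedup_by_time_py_spec : Claim_equal_dedup_by_time_py := by
  intro rows _
  unfold Spec_dedup_by_time_py
  exact final_eq rows
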